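-- pv_equiv track=rewrite | github.com/Thelegendzz/MotionScape | preprocess/remove_letter.py | frame_ranges_from_flags
-- ===== SOURCE A (Python) =====
-- from typing import Any, Dict, Iterable, List, Sequence, Tuple
--
-- def frame_ranges_from_flags(flags: Sequence[bool]) -> List[Tuple[int, int]]:
--     ranges: List[Tuple[int, int]] = []
--     start = None
--     for i, f in enumerate(flags):
--         if f and start is None:
--             start = i
--         if not f and start is not None:
--             ranges.append((start, i - 1))
--             start = None
--     if start is not None:
--         ranges.append((start, len(flags) - 1))
--     return ranges
-- ===== SOURCE B (Python) =====
-- from itertools import groupby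
--
-- def frame_ranges_from_flags(flags):
--     ranges = []
--     for key, grp in groupby(enumerate(flags), key=lambda p: bool(p[1])):
--         if key:
--             idxs = [i for i, _ in grp]
--             ranges.append((idxs[0], idxs[-1]))
--     return ranges
-- ===== Notes on version B (the rewrite author's own statement) =====
-- stated objective: idiomatic
-- what changed: Replaces the explicit start/None state machine with itertools.groupby over enumerate: the sequence is partitioned into maximal runs first, and each True run contributes (first_index, last_index).
import Mathlib
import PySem

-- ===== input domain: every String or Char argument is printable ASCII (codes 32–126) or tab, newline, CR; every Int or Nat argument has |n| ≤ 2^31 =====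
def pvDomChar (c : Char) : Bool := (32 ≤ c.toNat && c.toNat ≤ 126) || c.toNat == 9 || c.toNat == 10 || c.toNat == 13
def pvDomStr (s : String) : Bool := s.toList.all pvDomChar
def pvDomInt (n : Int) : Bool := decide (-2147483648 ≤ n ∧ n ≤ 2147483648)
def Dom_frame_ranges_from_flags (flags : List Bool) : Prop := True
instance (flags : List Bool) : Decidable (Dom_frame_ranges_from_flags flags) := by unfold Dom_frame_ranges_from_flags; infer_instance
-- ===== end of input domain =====

-- B replaces A's explicit start/None state machine with a groupby-style partition into
-- maximal runs, emitting (first, last) for each True run (idiomatic decomposition, same cost).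

-- shared helper: enumerate(flags) starting at index i (both Pythons call enumerate)
def pvEnumFrom (i : Int) : List Bool → List (Int × Bool)
  | [] => []
  | f :: r => (i, f) :: pvEnumFrom (i + 1) r

-- ===== PORT A =====
-- one iteration of A's for-loop body over state (ranges, start)
def pvStepA (st : List (Int × Int) × Option Int) (p : Int × Bool) : List (Int × Int) × Option Int :=
  let start := if p.2 ∧ st.2 = none then some p.1 else st.2
  match start with
  | some s => if ¬ p.2 then (st.1 ++ [(s, p.1 - 1)], none) else (st.1, some s)
  | none => (st.1, none)

def frame_ranges_from_flags (flags : List Bool) : List (Int × Int) :=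
  let st := (pvEnumFrom 0 flags).foldl pvStepA ([], none)
  match st.2 with
  | some s => st.1 ++ [(s, (flags.length : Int) - 1)]
  | none => st.1

-- ===== PORT B =====
-- groupby: peel the maximal run of pairs whose flag equals b, returning (indices of the run, rest)
def pvTakeRun (b : Bool) : List (Int × Bool) → List Int × List (Int × Bool)
  | [] => ([], [])
  | (i, f) :: rest =>
      if f = b then
        let p := pvTakeRun b rest
        (i :: p.1, p.2)
      else ([], (i, f) :: rest)

theorem pvTakeRun_len (b : Bool) (l : List (Int × Bool)) : (pvTakeRun b l).2.length ≤ l.length := by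
  induction l with
  | nil => simp [pvTakeRun]
  | cons hd tl ih =>
      obtain ⟨i, f⟩ := hd
      by_cases h : f = b <;> simp [pvTakeRun, h] <;> omega

-- iterate groupby's groups: a True group yields (first index, last index), a False group yields nothing
def pvGroups : List (Int × Bool) → List (Int × Int)
  | [] => []
  | (i, f) :: rest =>
      let p := pvTakeRun f rest
      if f then (i, p.1.getLastD i) :: pvGroups p.2 else pvGroups p.2
termination_by l => l.length
decreasing_by all_goals · simp only [List.length_cons]; have := pvTakeRun_len f rest; omega

def frame_ranges_from_flags_alt (flags : List Bool) : List (Int × Int) :=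
  pvGroups (pvEnumFrom 0 flags)

-- ===== PRECONDITION & SPEC =====
def Spec_frame_ranges_from_flags (flags : List Bool) (out : List (Int × Int)) : Prop := out = frame_ranges_from_flags_alt flags
instance (flags : List Bool) (out : List (Int × Int)) : Decidable (Spec_frame_ranges_from_flags flags out) := by unfold Spec_frame_ranges_from_flags; infer_instance

-- ===== CLAIM (what is proved, stated in full; the proofs are below) =====
def Claim_equal_frame_ranges_from_flags : Prop := ∀ (flags : List Bool), Dom_frame_ranges_from_flags flags → Spec_frame_ranges_from_flags flags (frame_ranges_from_flags flags)

-- ===== LEMMAS AND PROOFS =====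

theorem pvGetLastD_cons (a d : Int) (l : List Int) : (a :: l).getLast?.getD d = l.getLast?.getD a := by
  cases l with
  | nil => simp
  | cons b t =>
      rw [List.getLast?_cons_cons]
      obtain ⟨x, hx⟩ : ∃ x, (b :: t).getLast? = some x := by
        cases h : (b :: t).getLast? with
        | none => simp [List.getLast?_eq_none_iff] at h
        | some x => exact ⟨x, rfl⟩
      simp [hx]

-- A's final "if start is not None" flush, abstracted over the last index
def pvFinishA (st : List (Int × Int) × Option Int) (last : Int) : List (Int × Int) :=
  match st.2 with
  | some s => st.1 ++ [(s, last)]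
  | none => st.1

theorem pvGroups_skip_false (t : List (Int × Bool)) :
    pvGroups (pvTakeRun false t).2 = pvGroups t := by
  induction t with
  | nil => simp [pvTakeRun]
  | cons hd tl ih =>
      obtain ⟨j, g⟩ := hd
      cases g
      · simp [pvTakeRun, pvGroups]
      · simp [pvTakeRun, pvGroups]

theorem pvGroups_cons_false (i : Int) (t : List (Int × Bool)) :
    pvGroups ((i, false) :: t) = pvGroups t := by
  simp [pvGroups, pvGroups_skip_false]

-- joint run invariant: the A-loop from a closed state matches pvGroups, and from an open
-- state (start = some s) it matches the pending True run closed off by pvTakeRun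
theorem pv_loop_inv (l : List Bool) :
    (∀ (i : Int) (acc : List (Int × Int)),
        pvFinishA ((pvEnumFrom i l).foldl pvStepA (acc, none)) (i + l.length - 1)
          = acc ++ pvGroups (pvEnumFrom i l)) ∧
    (∀ (i s : Int) (acc : List (Int × Int)),
        pvFinishA ((pvEnumFrom i l).foldl pvStepA (acc, some s)) (i + l.length - 1)
          = acc ++ (s, ((pvTakeRun true (pvEnumFrom i l)).1).getLastD (i - 1))
              :: pvGroups (pvTakeRun true (pvEnumFrom i l)).2) := by
  induction l with
  | nil => constructor <;> intros <;> simp [pvEnumFrom, pvFinishA, pvGroups, pvTakeRun]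
  | cons f rest ih =>
      obtain ⟨ih1, ih2⟩ := ih
      constructor
      · intro i acc
        cases f
        · -- false head, closed state: nothing happens
          have h := ih1 (i + 1) acc
          simp only [pvEnumFrom, List.foldl_cons, List.length_cons, pvGroups_cons_false]
          push_cast
          rw [show i + ((rest.length : Int) + 1) - 1 = i + 1 + (rest.length : Int) - 1 by ring]
          simpa [pvStepA] using h
        · -- true head, closed state: open a run at i
          have h := ih2 (i + 1) i acc
          simp only [show (i : Int) + 1 - 1 = i by ring] at h
          simp only [pvEnumFrom, List.foldl_cons, List.length_cons]
          push_cast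
          rw [show i + ((rest.length : Int) + 1) - 1 = i + 1 + (rest.length : Int) - 1 by ring]
          simpa [pvStepA, pvGroups] using h
      · intro i s acc
        cases f
        · -- false head, open state: close the run at i - 1
          have h := ih1 (i + 1) (acc ++ [(s, i - 1)])
          simp only [pvEnumFrom, List.foldl_cons, List.length_cons]
          push_cast
          rw [show i + ((rest.length : Int) + 1) - 1 = i + 1 + (rest.length : Int) - 1 by ring]
          simpa [pvStepA, pvTakeRun, pvGroups_cons_false] using h
        · -- true head, open state: the run continues
          have h := ih2 (i + 1) s acc
          simp only [show (i : Int) + 1 - 1 = i by ring] at h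
          simp only [pvEnumFrom, List.foldl_cons, List.length_cons]
          push_cast
          rw [show i + ((rest.length : Int) + 1) - 1 = i + 1 + (rest.length : Int) - 1 by ring]
          simpa [pvStepA, pvTakeRun, pvGetLastD_cons] using h

-- ===== VERDICT (by name: the statement is the Claim_ definition above) =====
theorem frame_ranges_from_flags_spec : Claim_equal_frame_ranges_from_flags := by
  intro flags _
  show frame_ranges_from_flags flags = frame_ranges_from_flags_alt flags
  have h := (pv_loop_inv flags).1 0 []
  have h' : pvFinishA ((pvEnumFrom 0 flags).foldl pvStepA ([], none)) ((flags.length : Int) - 1)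
      = pvGroups (pvEnumFrom 0 flags) := by simpa using h
  exact h'
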